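-- pv_equiv track=rewrite | github.com/jarulsamy/Reoder-PDF | ReorderPDF/reorder.py | generate_order
-- ===== SOURCE A (Python) =====
-- def generate_order(total: int):
--     """Generates a page order, moving from either side inward.
--
--     A handy default order when using a document feeder,
--     and scanning doubled sided documents.
--
--     Args:
--         total: Int of total number of pages.
--
--     Returns:
--         list of page numbers in correct order.
--
--     Raises:
--         None
--
--     Example, 10 pages.
--     >>> generate_order(10)
--         [0, 9, 1, 8, 2, 6, 3, 5, 4]
--     """
--     order = []
--     i = 0
--     while i < total / 2:
--         order.append(i)
--         order.append(total - i)
--         i += 1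
--     return order
-- ===== SOURCE B (Python) =====
-- def generate_order(total: int):
--     k = max(0, (total + 1) // 2)
--     order = [None] * (2 * k)
--     order[0::2] = range(k)
--     order[1::2] = (total - i for i in range(k))
--     return order
-- ===== Notes on version B (the rewrite author's own statement) =====
-- stated objective: alternative
-- what changed: Replaces the interleaved while-loop of appends with a closed-form iteration count k = max(0,(total+1)//2) and two strided slice-assignment fills into a pre-sized list.
import Mathlib
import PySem

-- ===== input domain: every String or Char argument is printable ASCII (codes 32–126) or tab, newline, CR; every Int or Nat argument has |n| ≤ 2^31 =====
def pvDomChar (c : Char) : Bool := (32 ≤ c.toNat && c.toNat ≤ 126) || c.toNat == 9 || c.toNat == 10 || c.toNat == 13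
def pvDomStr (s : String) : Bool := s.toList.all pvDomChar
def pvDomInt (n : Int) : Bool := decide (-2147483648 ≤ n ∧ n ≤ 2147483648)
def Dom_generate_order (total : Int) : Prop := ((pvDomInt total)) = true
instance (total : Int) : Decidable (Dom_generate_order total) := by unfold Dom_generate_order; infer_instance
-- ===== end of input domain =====

-- B replaces A's interleaved append loop with a closed-form count k and two strided fills (alternative decomposition, same cost).

-- ===== PORT A =====
-- while i < total / 2: for integers i, total this float comparison is exactly 2*i < total
def generate_order_loop (total i : Int) (order : List Int) : List Int :=
  if _h : 2 * i < total then
    generate_order_loop total (i + 1) (order ++ [i, total - i])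
  else
    order
termination_by (total - 2 * i).toNat
decreasing_by omega

def generate_order (total : Int) : List Int :=
  generate_order_loop total 0 []

-- ===== PORT B =====
-- order[0::2] = evens, order[1::2] = odds on a list of length 2*k: interleave the two strided fills
def pvInterleave : List Int → List Int → List Int
  | a :: as, b :: bs => a :: b :: pvInterleave as bs
  | _, _ => []

def generate_order_alt (total : Int) : List Int :=
  let k : Int := max 0 (PySem.Int.floordiv (total + 1) 2)
  let evens : List Int := (List.range k.toNat).map (fun j : Nat => (j : Int))
  let odds : List Int := (List.range k.toNat).map (fun j : Nat => total - (j : Int))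
  pvInterleave evens odds

-- ===== PRECONDITION & SPEC =====
def Spec_generate_order (total : Int) (out : List Int) : Prop := out = generate_order_alt total
instance (total : Int) (out : List Int) : Decidable (Spec_generate_order total out) := by unfold Spec_generate_order; infer_instance

-- ===== CLAIM (what is proved, stated in full; the proofs are below) =====
def Claim_equal_generate_order : Prop := ∀ (total : Int), Dom_generate_order total → Spec_generate_order total (generate_order total)

-- ===== LEMMAS AND PROOFS =====

lemma generate_order_loop_eq (m : Nat) : ∀ (total i : Int) (acc : List Int),
    total - 2 * i ≤ 2 * (m : Int) →
    ((m : Int) = 0 ∨ 2 * (m : Int) ≤ total - 2 * i + 1) →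
    generate_order_loop total i acc =
      acc ++ pvInterleave ((List.range m).map (fun j : Nat => i + (j : Int)))
                          ((List.range m).map (fun j : Nat => total - (i + (j : Int)))) := by
  induction m with
  | zero =>
    intro total i acc h1 _
    rw [generate_order_loop, dif_neg (by omega)]
    simp [pvInterleave]
  | succ m ih =>
    intro total i acc h1 h2
    have hc : 2 * i < total := by
      rcases h2 with h | h
      · omega
      · push_cast at h ⊢; omega
    rw [generate_order_loop, dif_pos hc]
    rw [ih total (i + 1) (acc ++ [i, total - i]) (by push_cast at h1 ⊢; omega)
          (by rcases h2 with h | h; · left; push_cast at h ⊢; omega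
              · by_cases hm : m = 0
                · left; simp [hm]
                · right; push_cast at h ⊢; omega)]
    rw [List.range_succ_eq_map]
    simp only [List.map_cons, List.map_map, pvInterleave]
    have e1 : ((fun j : Nat => i + (j : Int)) ∘ Nat.succ) = (fun j : Nat => (i + 1) + (j : Int)) := by
      funext j; simp [Function.comp, Nat.succ_eq_add_one]; ring
    have e2 : ((fun j : Nat => total - (i + (j : Int))) ∘ Nat.succ) = (fun j : Nat => total - ((i + 1) + (j : Int))) := by
      funext j; simp [Function.comp, Nat.succ_eq_add_one]; ring
    rw [e1, e2]
    simp

-- ===== VERDICT (by name: the statement is the Claim_ definition above) =====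
theorem generate_order_spec : Claim_equal_generate_order := by
  intro total _
  unfold Spec_generate_order generate_order generate_order_alt
  set k : Int := max 0 (PySem.Int.floordiv (total + 1) 2) with hk
  have hfd : PySem.Int.floordiv (total + 1) 2 = (total + 1) / 2 :=
    PySem.Int.floordiv_eq_ediv_of_pos (by omega)
  have hk0 : 0 ≤ k := le_max_left _ _
  have hkt : (k.toNat : Int) = k := Int.toNat_of_nonneg hk0
  rw [generate_order_loop_eq k.toNat total 0 []]
  · simp
  · rw [hkt, hk, hfd]; omega
  · rw [hkt]
    by_cases h : k = 0
    · left; exact h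
    · right; rw [hk, hfd] at *; omega
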